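-- pv_equiv track=rewrite | github.com/Minh-M80/Python | dayamlientiepdainhat.py | longest_negative_subarrays
-- ===== SOURCE A (Python) =====
-- def longest_negative_subarrays(arr):
--     max_len = 0
--     current_len = 0
--     start_idx = -1
--     subarrays = []
--
--     for i, num in enumerate(arr):
--         if num < 0:
--             if current_len == 0:
--                 start_idx = i  # Đánh dấu vị trí bắt đầu của dãy âm hiện tại
--             current_len += 1
--         else:
--             if current_len > 0:
--                 # Kiểm tra xem dãy con hiện tại có phải là dài nhất hay không
--                 if current_len > max_len:
--                     max_len = current_len
--                     subarrays = [arr[start_idx:start_idx + current_len]]  # Cập nhật danh sách mới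
--                 elif current_len == max_len:
--                     subarrays.append(arr[start_idx:start_idx + current_len])  # Thêm dãy vào danh sách
--             current_len = 0  # Đặt lại độ dài
--
--     # Xử lý trường hợp dãy kết thúc bằng số âm
--     if current_len > 0:
--         if current_len > max_len:
--             max_len = current_len
--             subarrays = [arr[start_idx:start_idx + current_len]]
--         elif current_len == max_len:
--             subarrays.append(arr[start_idx:start_idx + current_len])
--
--     return subarrays
-- ===== SOURCE B (Python) =====
-- def longest_negative_subarrays(arr):
--     # Pass 1: collect every maximal run of consecutive negatives.
--     runs = []
--     current = []
--     for num in arr: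
--         if num < 0:
--             current.append(num)
--         elif current:
--             runs.append(current)
--             current = []
--     if current:
--         runs.append(current)
--     # Pass 2: keep the runs of maximal length (left-to-right order kept).
--     if not runs:
--         return []
--     m = max(len(r) for r in runs)
--     return [r for r in runs if len(r) == m]
-- ===== Notes on version B (the rewrite author's own statement) =====
-- stated objective: simpler
-- what changed: A fuses tie/max tracking and index-based slicing into one scan with a trailing flush; B first collects all maximal negative runs by value in one pass, then separately filters the runs of maximal length.
import Mathlib
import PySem

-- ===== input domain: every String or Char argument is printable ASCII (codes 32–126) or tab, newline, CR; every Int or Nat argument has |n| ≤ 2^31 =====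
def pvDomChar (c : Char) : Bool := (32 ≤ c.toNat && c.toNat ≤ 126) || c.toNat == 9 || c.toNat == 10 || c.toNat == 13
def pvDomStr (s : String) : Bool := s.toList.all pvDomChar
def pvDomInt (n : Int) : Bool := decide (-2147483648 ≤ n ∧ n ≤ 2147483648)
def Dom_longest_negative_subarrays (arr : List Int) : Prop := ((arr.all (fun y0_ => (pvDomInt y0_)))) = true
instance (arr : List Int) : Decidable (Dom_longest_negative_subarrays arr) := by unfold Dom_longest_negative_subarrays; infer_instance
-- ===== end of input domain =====

-- B separates the two concerns A fuses into one scan: one pass collects the maximal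
-- negative runs by value (no indices, no slices), a second step filters out the runs of
-- maximal length; same results, objective: simpler decomposition (no speed claim).

-- ===== PORT A =====
-- A's trailing flush block (repeated verbatim after the loop in the Python) as a helper.
def flushA (arr : List Int) (st : Int × Int × Int × List (List Int)) : List (List Int) :=
  if st.2.1 > 0 then
    if st.2.1 > st.1 then [PySem.List.slice arr (some st.2.2.1) (some (st.2.2.1 + st.2.1))]
    else if st.2.1 = st.1 then st.2.2.2 ++ [PySem.List.slice arr (some st.2.2.1) (some (st.2.2.1 + st.2.1))]
    else st.2.2.2
  else st.2.2.2

-- the 'for i, num in enumerate(arr)' loop, state (max_len, current_len, start_idx, subarrays)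
def loopA (arr : List Int) (i : Nat) (rest : List Int) (st : Int × Int × Int × List (List Int)) :
    Int × Int × Int × List (List Int) :=
  match rest with
  | [] => st
  | num :: t =>
    let ml := st.1; let cl := st.2.1; let si := st.2.2.1; let subs := st.2.2.2
    if num < 0 then
      loopA arr (i+1) t (ml, cl + 1, (if cl = 0 then (i : Int) else si), subs)
    else
      if cl > 0 then
        if cl > ml then
          loopA arr (i+1) t (cl, 0, si, [PySem.List.slice arr (some si) (some (si + cl))])
        else if cl = ml then
          loopA arr (i+1) t (ml, 0, si, subs ++ [PySem.List.slice arr (some si) (some (si + cl))])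
        else loopA arr (i+1) t (ml, 0, si, subs)
      else loopA arr (i+1) t (ml, 0, si, subs)

def longest_negative_subarrays (arr : List Int) : List (List Int) :=
  flushA arr (loopA arr 0 arr (0, 0, -1, []))

-- ===== PORT B =====
-- one step of B's collecting loop, state (runs, current)
def stepB (st : List (List Int) × List Int) (num : Int) : List (List Int) × List Int :=
  if num < 0 then (st.1, st.2 ++ [num])
  else if st.2 ≠ [] then (st.1 ++ [st.2], [])
  else st

-- 'if current: runs.append(current)' after the loop
def finishB (st : List (List Int) × List Int) : List (List Int) :=
  if st.2 ≠ [] then st.1 ++ [st.2] else st.1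

-- 'if not runs: return []; m = max(len(r) for r in runs); return [r for r in runs if len(r) == m]'
def selB (runs : List (List Int)) : List (List Int) :=
  match runs with
  | [] => []
  | r :: rs =>
    let m := (PySem.List.max? ((r :: rs).map (fun q => (q.length : Int))) (fun y => y)).getD 0
    (r :: rs).filter (fun q => decide ((q.length : Int) = m))

def longest_negative_subarrays_alt (arr : List Int) : List (List Int) :=
  selB (finishB (arr.foldl stepB ([], [])))

-- ===== PRECONDITION & SPEC =====
def Spec_longest_negative_subarrays (arr : List Int) (out : List (List Int)) : Prop := out = longest_negative_subarrays_alt arr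
instance (arr : List Int) (out : List (List Int)) : Decidable (Spec_longest_negative_subarrays arr out) := by unfold Spec_longest_negative_subarrays; infer_instance

-- ===== CLAIM (what is proved, stated in full; the proofs are below) =====
def Claim_equal_longest_negative_subarrays : Prop := ∀ (arr : List Int), Dom_longest_negative_subarrays arr → Spec_longest_negative_subarrays arr (longest_negative_subarrays arr)

-- ===== LEMMAS AND PROOFS =====

-- A's "compare one closed run against (max_len, subarrays)" update, as a pure step.
def stepSel (st : Int × List (List Int)) (r : List Int) : Int × List (List Int) :=
  if (r.length : Int) > st.1 then ((r.length : Int), [r])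
  else if (r.length : Int) = st.1 then (st.1, st.2 ++ [r])
  else st

def selfold (runs : List (List Int)) : Int × List (List Int) := runs.foldl stepSel (0, [])

def maxLenI (runs : List (List Int)) : Int :=
  runs.foldl (fun m r => max m ((r.length : Int))) 0

lemma le_maxLenI {runs : List (List Int)} {r : List Int} (h : r ∈ runs) :
    (r.length : Int) ≤ maxLenI runs :=
  (PySem.List.le_foldl_max_int runs (fun q => (q.length : Int)) 0).2 r h

lemma selfold_char (runs : List (List Int)) :
    selfold runs = (maxLenI runs, runs.filter (fun r => decide ((r.length : Int) = maxLenI runs))) := by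
  induction runs using List.reverseRecOn with
  | nil => simp [selfold, maxLenI]
  | append_singleton rs r ih =>
    have hM : maxLenI (rs ++ [r]) = max (maxLenI rs) (r.length : Int) := by
      simp [maxLenI, List.foldl_append]
    have hS : selfold (rs ++ [r]) = stepSel (selfold rs) r := by
      simp [selfold, List.foldl_append]
    rw [hS, ih, hM]
    unfold stepSel
    rcases lt_trichotomy (maxLenI rs) ((r.length : Int)) with hlt | heq | hgt
    · have hmax : max (maxLenI rs) ((r.length : Int)) = (r.length : Int) := max_eq_right hlt.le
      have hnil : rs.filter (fun q => decide ((q.length : Int) = (r.length : Int))) = [] := by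
        refine List.filter_eq_nil_iff.mpr ?_
        intro q hq
        have := le_maxLenI hq
        simp only [decide_eq_true_eq]
        omega
      simp only [hmax]
      rw [if_pos hlt]
      simp [List.filter_append]
      intro a ha
      have := le_maxLenI (runs := rs) ha
      omega
    · have hmax : max (maxLenI rs) ((r.length : Int)) = maxLenI rs := by omega
      simp only [hmax]
      rw [if_neg (by omega), if_pos heq.symm]
      simp [List.filter_append, heq]
    · have hmax : max (maxLenI rs) ((r.length : Int)) = maxLenI rs := by omega
      simp only [hmax]
      rw [if_neg (by omega), if_neg (by omega)]
      simp [List.filter_append]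
      omega

lemma selB_eq (runs : List (List Int)) : selB runs = (selfold runs).2 := by
  cases runs with
  | nil => simp [selB, selfold]
  | cons r rs =>
    have hmax : PySem.List.max? ((r :: rs).map (fun q => (q.length : Int))) (fun y => y)
        = some ((rs.map (fun q => (q.length : Int))).foldl max ((r.length : Int))) := by
      simpa using PySem.List.max?_id_cons ((r.length : Int)) (rs.map (fun q => (q.length : Int)))
    have hfold : (rs.map (fun q => (q.length : Int))).foldl max ((r.length : Int)) = maxLenI (r :: rs) := by
      have h0 : maxLenI (r :: rs) = rs.foldl (fun m q => max m ((q.length : Int))) (max 0 (r.length : Int)) := by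
        simp [maxLenI]
      rw [List.foldl_map, h0]
      have h1 : max (0 : Int) ((r.length : Int)) = (r.length : Int) := by omega
      rw [h1]
    rw [selfold_char]
    simp only [selB, hmax, hfold, Option.getD_some]

lemma slice_runs (pre0 cur rest : List Int) :
    PySem.List.slice (pre0 ++ cur ++ rest) (some ((pre0.length : Int)))
      (some ((pre0.length : Int) + (cur.length : Int))) = cur := by
  rw [PySem.List.slice_natCast_add]
  rw [List.append_assoc, List.drop_left]
  simp

lemma loop_eq (rest : List Int) : ∀ (pre0 cur : List Int) (runs : List (List Int)) (si : Int),
    (cur ≠ [] → si = (pre0.length : Int)) →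
    flushA (pre0 ++ cur ++ rest)
        (loopA (pre0 ++ cur ++ rest) (pre0.length + cur.length) rest
          ((selfold runs).1, (cur.length : Int), si, (selfold runs).2))
      = selB (finishB (rest.foldl stepB (runs, cur))) := by
  induction rest with
  | nil =>
    intro pre0 cur runs si hsi
    simp only [loopA, List.foldl_nil]
    by_cases hc : cur = []
    · subst hc
      simp only [flushA]
      rw [if_neg (by simp)]
      simp [finishB, selB_eq]
    · have hsi' := hsi hc
      have hpos : (0 : Int) < (cur.length : Int) := by
        have hne : cur.length ≠ 0 := by simpa using hc
        exact_mod_cast Nat.pos_of_ne_zero hne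
      have hslice : PySem.List.slice (pre0 ++ cur ++ []) (some si) (some (si + (cur.length : Int))) = cur := by
        rw [hsi']; exact slice_runs pre0 cur []
      have hfin : finishB (runs, cur) = runs ++ [cur] := by simp [finishB, hc]
      rw [hfin, selB_eq]
      have hsel : selfold (runs ++ [cur]) = stepSel (selfold runs) cur := by
        simp [selfold, List.foldl_append]
      rw [hsel]
      simp only [flushA, hslice]
      rw [if_pos hpos]
      unfold stepSel
      split_ifs <;> rfl
  | cons num t ih =>
    intro pre0 cur runs si hsi
    simp only [List.foldl_cons]
    by_cases hneg : num < 0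
    · have hstep : loopA (pre0 ++ cur ++ (num :: t)) (pre0.length + cur.length) (num :: t)
          ((selfold runs).1, (cur.length : Int), si, (selfold runs).2)
          = loopA (pre0 ++ cur ++ (num :: t)) (pre0.length + cur.length + 1) t
            ((selfold runs).1, (cur.length : Int) + 1,
              (if (cur.length : Int) = 0 then ((pre0.length + cur.length : Nat) : Int) else si),
              (selfold runs).2) := by
        simp [loopA, hneg]
      rw [hstep]
      have hB : stepB (runs, cur) num = (runs, cur ++ [num]) := by simp [stepB, hneg]
      rw [hB]
      have hsi2 : (cur ++ [num]) ≠ [] →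
          (if (cur.length : Int) = 0 then ((pre0.length + cur.length : Nat) : Int) else si)
            = (pre0.length : Int) := by
        intro _
        by_cases h0 : cur = []
        · subst h0; simp
        · have hne : ¬ ((cur.length : Int) = 0) := by
            simpa using h0
          rw [if_neg hne]; exact hsi h0
      have harr : pre0 ++ cur ++ (num :: t) = pre0 ++ (cur ++ [num]) ++ t := by simp
      have hidx : pre0.length + cur.length + 1 = pre0.length + (cur ++ [num]).length := by
        simp only [List.length_append, List.length_cons, List.length_nil]; omega
      have hlen2 : ((cur ++ [num]).length : Int) = (cur.length : Int) + 1 := by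
        simp only [List.length_append, List.length_cons, List.length_nil]
        push_cast; omega
      rw [harr, hidx, ← hlen2]
      exact ih pre0 (cur ++ [num]) runs _ hsi2
    · by_cases hc : cur = []
      · subst hc
        have hstep : loopA (pre0 ++ [] ++ (num :: t)) (pre0.length + ([] : List Int).length) (num :: t)
            ((selfold runs).1, ((([] : List Int).length : Int)), si, (selfold runs).2)
            = loopA (pre0 ++ [] ++ (num :: t)) (pre0.length + ([] : List Int).length + 1) t
              ((selfold runs).1, ((([] : List Int).length : Int)), si, (selfold runs).2) := by
          simp [loopA, hneg]
        rw [hstep]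
        have hB : stepB (runs, []) num = (runs, []) := by simp [stepB, hneg]
        rw [hB]
        have harr : pre0 ++ ([] : List Int) ++ (num :: t) = (pre0 ++ [num]) ++ ([] : List Int) ++ t := by simp
        have hidx : pre0.length + ([] : List Int).length + 1 = (pre0 ++ [num]).length + ([] : List Int).length := by simp
        rw [harr, hidx]
        exact ih (pre0 ++ [num]) [] runs si (by simp)
      · have hsi' := hsi hc
        have hpos : (0 : Int) < (cur.length : Int) := by
          have hne : cur.length ≠ 0 := by simpa using hc
          exact_mod_cast Nat.pos_of_ne_zero hne
        have hslice : PySem.List.slice (pre0 ++ cur ++ (num :: t)) (some si) (some (si + (cur.length : Int))) = cur := by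
          rw [hsi']; exact slice_runs pre0 cur (num :: t)
        have hsel : selfold (runs ++ [cur]) = stepSel (selfold runs) cur := by
          simp [selfold, List.foldl_append]
        have hstep : loopA (pre0 ++ cur ++ (num :: t)) (pre0.length + cur.length) (num :: t)
            ((selfold runs).1, (cur.length : Int), si, (selfold runs).2)
            = loopA (pre0 ++ cur ++ (num :: t)) (pre0.length + cur.length + 1) t
              ((selfold (runs ++ [cur])).1, 0, si, (selfold (runs ++ [cur])).2) := by
          rw [hsel]
          simp only [loopA]
          rw [if_neg hneg, if_pos hpos]
          simp only [hslice]
          unfold stepSel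
          split_ifs <;> rfl
        rw [hstep]
        have hB : stepB (runs, cur) num = (runs ++ [cur], []) := by simp [stepB, hneg, hc]
        rw [hB]
        have harr : pre0 ++ cur ++ (num :: t) = (pre0 ++ cur ++ [num]) ++ ([] : List Int) ++ t := by simp
        have hidx : pre0.length + cur.length + 1 = (pre0 ++ cur ++ [num]).length + ([] : List Int).length := by
          simp only [List.length_append, List.length_cons, List.length_nil]
        rw [harr, hidx]
        exact ih (pre0 ++ cur ++ [num]) [] (runs ++ [cur]) si (by simp)

-- ===== VERDICT (by name: the statement is the Claim_ definition above) =====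
theorem longest_negative_subarrays_spec : Claim_equal_longest_negative_subarrays := by
  intro arr _
  unfold Spec_longest_negative_subarrays longest_negative_subarrays longest_negative_subarrays_alt
  have h := loop_eq arr [] [] [] (-1) (by simp)
  simpa [selfold] using h
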